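-- pv_equiv track=rewrite | github.com/benquick123/code-profiling | code/batch-2/vse-naloge-brez-testov/DN6-Z-024.py | hashtagi
-- ===== SOURCE A (Python) =====
-- def izloci_besedo(beseda):
--   a=-1
--   b=-1
--   for i, e in enumerate(beseda):
--     if e.isalnum():
--       a=i
--       break
--   if a == -1:
--     return ''
--   for i, e in enumerate(beseda[::-1]):
--     if e.isalnum():
--       b=i
--       break
--   dejanski_index_b=len(beseda)-1-b
--   return beseda[a:dejanski_index_b+1]
--
-- def se_zacne_z(tvit, c):
--   return [izloci_besedo(e) for e in tvit.split(' ') if len(e)>0 and e[0]==c]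
--
-- def hashtagi(tviti):
--   slovar={}
--   for tvit in tviti:
--     a=tvit.split(':')
--     avtor=a[0]
--     for has in se_zacne_z(tvit, '#'):
--       if has in slovar:
--         slovar[has].add(avtor)
--       else:
--         slovar[has]=set([avtor])
--   return {key:sorted(list(slovar[key])) for key in slovar}
-- ===== SOURCE B (Python) =====
-- def izloci_besedo(beseda):
--   a=-1
--   b=-1
--   for i, e in enumerate(beseda):
--     if e.isalnum():
--       a=i
--       break
--   if a == -1:
--     return ''
--   for i, e in enumerate(beseda[::-1]):
--     if e.isalnum():
--       b=i
--       break
--   dejanski_index_b=len(beseda)-1-b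
--   return beseda[a:dejanski_index_b+1]
--
-- def se_zacne_z(tvit, c):
--   return [izloci_besedo(e) for e in tvit.split(' ') if len(e)>0 and e[0]==c]
--
-- def hashtagi(tviti):
--   # flat pair stream, then group per first-occurrence key
--   pairs = [(h, tvit.split(':')[0]) for tvit in tviti for h in se_zacne_z(tvit, '#')]
--   kljuci = dict.fromkeys(h for h, _ in pairs)
--   return {k: sorted({a for h, a in pairs if h == k}) for k in kljuci}
-- ===== Notes on version B (the rewrite author's own statement) =====
-- stated objective: alternative
-- what changed: Replaces A's incremental dict-of-sets accumulation (membership test and in-place set.add per hashtag) with a flat (hashtag, author) pair stream that is then grouped: keys deduplicated in first-occurrence order and each group's author set collected and sorted in one comprehension.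
import Mathlib
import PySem

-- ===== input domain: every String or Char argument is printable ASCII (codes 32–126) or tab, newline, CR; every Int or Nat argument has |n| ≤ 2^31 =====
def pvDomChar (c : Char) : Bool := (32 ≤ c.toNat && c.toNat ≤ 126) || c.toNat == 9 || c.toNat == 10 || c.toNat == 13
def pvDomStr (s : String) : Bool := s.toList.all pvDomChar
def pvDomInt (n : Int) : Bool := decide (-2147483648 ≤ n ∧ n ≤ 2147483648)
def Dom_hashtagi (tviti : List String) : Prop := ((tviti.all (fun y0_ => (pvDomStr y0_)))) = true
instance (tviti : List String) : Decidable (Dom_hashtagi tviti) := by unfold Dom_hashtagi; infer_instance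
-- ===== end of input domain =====

-- B replaces A's incremental dict-of-sets accumulation by a flat (hashtag, author) pair
-- stream grouped per first-occurrence key; alternative decomposition, not claimed faster.

-- ===== PORT A =====
-- shared extraction helpers (identical in Source A and Source B)
def izlociBesedo (beseda : String) : String :=
  match List.findIdx? PySem.Chars.isalnum beseda.toList with
  | none => ""
  | some a =>
    let b : Int := match List.findIdx? PySem.Chars.isalnum beseda.toList.reverse with
      | some i => (i : Int)
      | none => -1
    let dejanskiIndexB : Int := (beseda.toList.length : Int) - 1 - b
    String.ofList (PySem.List.slice beseda.toList (some (a : Int)) (some (dejanskiIndexB + 1)))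

def seZacneZ (tvit : String) (c : Char) : List String :=
  (((PySem.Str.split? tvit " ").getD []).filter
    (fun e => decide (0 < PySem.Str.len e) && (PySem.Str.pyGet? e 0 == some c))).map izlociBesedo

def hashtagi (tviti : List String) : List (String × List String) :=
  let slovar : PySem.Dict String (PySem.Set String) :=
    tviti.foldl (fun slovar tvit =>
      let a := (PySem.Str.split? tvit ":").getD []
      let avtor := a.headD ""
      (seZacneZ tvit '#').foldl (fun slovar has =>
        match slovar.get? has with
        | some s => slovar.insert has (PySem.Set.add s avtor)
        | none   => slovar.insert has (PySem.Set.ofList [avtor])) slovar) PySem.Dict.empty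
  slovar.items.map (fun kv => (kv.1, PySem.List.sorted kv.2 (fun x => x) false))

-- ===== PORT B =====
def hashtagi_alt (tviti : List String) : List (String × List String) :=
  let pairs : List (String × String) :=
    tviti.flatMap (fun tvit =>
      (seZacneZ tvit '#').map (fun h => (h, ((PySem.Str.split? tvit ":").getD []).headD "")))
  let kljuci := PySem.List.dedup (pairs.map (fun p => p.1))
  kljuci.map (fun k =>
    (k, PySem.List.sorted
          (PySem.Set.ofList ((pairs.filter (fun p => p.1 == k)).map (fun p => p.2)))
          (fun x => x) false))

-- ===== PRECONDITION & SPEC =====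
def Spec_hashtagi (tviti : List String) (out : List (String × List String)) : Prop := out = hashtagi_alt tviti
instance (tviti : List String) (out : List (String × List String)) : Decidable (Spec_hashtagi tviti out) := by unfold Spec_hashtagi; infer_instance

-- ===== CLAIM (what is proved, stated in full; the proofs are below) =====
def Claim_equal_hashtagi : Prop := ∀ (tviti : List String), Dom_hashtagi tviti → Spec_hashtagi tviti (hashtagi tviti)

-- ===== LEMMAS AND PROOFS =====

-- A's inner-loop body as one step over a (hashtag, author) pair
def pvStep (d : PySem.Dict String (PySem.Set String)) (p : String × String) :
    PySem.Dict String (PySem.Set String) :=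
  match d.get? p.1 with
  | some s => d.insert p.1 (PySem.Set.add s p.2)
  | none   => d.insert p.1 (PySem.Set.ofList [p.2])

-- the grouped shape both sides reach: keys in first-occurrence order, each with its author set
def pvShape (ps : List (String × String)) : List (String × PySem.Set String) :=
  (PySem.List.dedup (ps.map (fun p => p.1))).map (fun k =>
    (k, PySem.Set.ofList ((ps.filter (fun p => p.1 == k)).map (fun p => p.2))))

lemma pvFoldl_flatMap {α β σ : Type} (g : α → List β) (f : σ → β → σ) (l : List α) (init : σ) :
    (l.flatMap g).foldl f init = l.foldl (fun acc x => (g x).foldl f acc) init := by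
  induction l generalizing init with
  | nil => rfl
  | cons x t ih => simp [List.flatMap_cons, List.foldl_append, ih]

lemma pvOfList_append {α : Type} [BEq α] (xs : List α) (x : α) :
    PySem.Set.ofList (xs ++ [x]) = PySem.Set.add (PySem.Set.ofList xs) x := by
  simp [PySem.Set.ofList]

lemma pvFind?_shape (kljuci : List String) (v : String → PySem.Set String) (k : String) :
    (kljuci.map (fun k' => (k', v k'))).find? (fun p => p.1 == k) =
      if k ∈ kljuci then some (k, v k) else none := by
  induction kljuci with
  | nil => simp
  | cons x t ih =>
    by_cases hx : x = k
    · subst hx; simp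
    · have hxk : ¬ k = x := fun he => hx he.symm
      simp [hx, hxk, ih, beq_iff_eq]

lemma pvShape_append (ps : List (String × String)) (p : String × String) :
    pvShape (ps ++ [p]) =
      (if p.1 ∈ ps.map (fun q => q.1) then
        (pvShape ps).map (fun q => if q.1 = p.1 then
            (p.1, PySem.Set.add q.2 p.2) else q)
      else pvShape ps ++ [(p.1, PySem.Set.ofList [p.2])]) := by
  unfold pvShape
  have hded : PySem.List.dedup ((ps ++ [p]).map (fun q => q.1)) =
      PySem.Set.add (PySem.List.dedup (ps.map (fun q => q.1))) p.1 := by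
    simp [PySem.List.dedup, PySem.Set.ofList]
  rw [hded]
  by_cases hmem : p.1 ∈ ps.map (fun q => q.1)
  · have hcon : PySem.Set.contains (PySem.List.dedup (ps.map (fun q => q.1))) p.1 = true := by
      simp [PySem.Set.contains, hmem]
    rw [PySem.Set.add, if_pos hcon, if_pos hmem, List.map_map]
    apply List.map_congr_left
    intro k _
    by_cases hkp : k = p.1
    · subst hkp
      simp [List.filter_append, pvOfList_append]
    · have hb : (p.1 == k) = false := beq_eq_false_iff_ne.mpr (fun he => hkp he.symm)
      simp [List.filter_append, hb, hkp]
  · have hcon : ¬ PySem.Set.contains (PySem.List.dedup (ps.map (fun q => q.1))) p.1 = true := by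
      simp [PySem.Set.contains, hmem]
    rw [PySem.Set.add, if_neg hcon, if_neg hmem, List.map_append]
    congr 1
    · apply List.map_congr_left
      intro k hk
      have hkps : k ∈ ps.map (fun q => q.1) := (PySem.List.mem_dedup _ _).mp hk
      have hne : ¬ p.1 = k := fun he => hmem (he ▸ hkps)
      have hb : (p.1 == k) = false := beq_eq_false_iff_ne.mpr hne
      simp [List.filter_append, hb]
    · have hfil : ps.filter (fun q => q.1 == p.1) = [] := by
        rw [List.filter_eq_nil_iff]
        intro q hq hbeq
        exact hmem (List.mem_map.mpr ⟨q, hq, by simpa [beq_iff_eq] using hbeq⟩)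
      simp [List.filter_append, hfil]

lemma pvStep_of_some (d : PySem.Dict String (PySem.Set String)) (p : String × String)
    (s : PySem.Set String) (h : d.get? p.1 = some s) :
    pvStep d p = d.insert p.1 (PySem.Set.add s p.2) := by
  unfold pvStep; rw [h]

lemma pvStep_of_none (d : PySem.Dict String (PySem.Set String)) (p : String × String)
    (h : d.get? p.1 = none) :
    pvStep d p = d.insert p.1 (PySem.Set.ofList [p.2]) := by
  unfold pvStep; rw [h]

lemma pvFold_shape (ps : List (String × String)) :
    (ps.foldl pvStep PySem.Dict.empty).items = pvShape ps := by
  induction ps using List.reverseRecOn with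
  | nil => simp [pvShape, PySem.List.dedup, PySem.Set.ofList, PySem.Set.empty, PySem.Dict.empty]
  | append_singleton ps p ih =>
    rw [List.foldl_append, List.foldl_cons, List.foldl_nil, pvShape_append]
    have hget : (ps.foldl pvStep PySem.Dict.empty).get? p.1 =
        if p.1 ∈ ps.map (fun q => q.1) then
          some (PySem.Set.ofList ((ps.filter (fun q => q.1 == p.1)).map (fun q => q.2)))
        else none := by
      rw [PySem.Dict.get?, ih]
      unfold pvShape
      rw [pvFind?_shape]
      by_cases hmem : p.1 ∈ ps.map (fun q => q.1)
      · rw [if_pos ((PySem.List.mem_dedup _ _).mpr hmem), if_pos hmem]; rfl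
      · rw [if_neg (fun h => hmem ((PySem.List.mem_dedup _ _).mp h)), if_neg hmem]; rfl
    have hconiff : (ps.foldl pvStep PySem.Dict.empty).contains p.1 = true ↔
        p.1 ∈ ps.map (fun q => q.1) := by
      rw [PySem.Dict.contains, ih]
      unfold pvShape
      rw [List.any_map]
      simp [Function.comp, beq_iff_eq]
    by_cases hmem : p.1 ∈ ps.map (fun q => q.1)
    · have hstep : pvStep (ps.foldl pvStep PySem.Dict.empty) p =
          (ps.foldl pvStep PySem.Dict.empty).insert p.1
            (PySem.Set.add (PySem.Set.ofList ((ps.filter (fun q => q.1 == p.1)).map (fun q => q.2))) p.2) :=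
        pvStep_of_some _ _ _ (by rw [hget, if_pos hmem])
      rw [if_pos hmem, hstep, PySem.Dict.insert, if_pos (hconiff.mpr hmem)]
      show ((ps.foldl pvStep PySem.Dict.empty).items.map _) = _
      rw [ih]
      unfold pvShape
      rw [List.map_map, List.map_map]
      apply List.map_congr_left
      intro k _
      by_cases hkp : k = p.1
      · subst hkp; simp
      · have hb : (k == p.1) = false := beq_eq_false_iff_ne.mpr hkp
        simp [hkp]
    · have hstep : pvStep (ps.foldl pvStep PySem.Dict.empty) p =
          (ps.foldl pvStep PySem.Dict.empty).insert p.1 (PySem.Set.ofList [p.2]) :=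
        pvStep_of_none _ _ (by rw [hget, if_neg hmem])
      rw [if_neg hmem, hstep, PySem.Dict.insert,
        if_neg (fun h => hmem (hconiff.mp h))]
      show (ps.foldl pvStep PySem.Dict.empty).items ++ [(p.1, PySem.Set.ofList [p.2])] = _
      rw [ih]

lemma pvHashtagi_eq (tviti : List String) : hashtagi tviti = hashtagi_alt tviti := by
  have hslovar :
      (tviti.foldl (fun slovar tvit =>
        let a := (PySem.Str.split? tvit ":").getD []
        let avtor := a.headD ""
        (seZacneZ tvit '#').foldl (fun slovar has =>
          match slovar.get? has with
          | some s => slovar.insert has (PySem.Set.add s avtor)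
          | none   => slovar.insert has (PySem.Set.ofList [avtor])) slovar) PySem.Dict.empty) =
      (tviti.flatMap (fun tvit =>
        (seZacneZ tvit '#').map (fun h => (h, ((PySem.Str.split? tvit ":").getD []).headD "")))).foldl
        pvStep PySem.Dict.empty := by
    rw [pvFoldl_flatMap]
    apply PySem.List.foldl_congr_mem
    intro acc tvit _
    rw [List.foldl_map]
    rfl
  show ((tviti.foldl (fun slovar tvit =>
      let a := (PySem.Str.split? tvit ":").getD []
      let avtor := a.headD ""
      (seZacneZ tvit '#').foldl (fun slovar has =>
        match slovar.get? has with
        | some s => slovar.insert has (PySem.Set.add s avtor)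
        | none   => slovar.insert has (PySem.Set.ofList [avtor])) slovar) PySem.Dict.empty).items.map
      (fun kv => (kv.1, PySem.List.sorted kv.2 (fun x => x) false))) =
    (PySem.List.dedup ((tviti.flatMap (fun tvit =>
      (seZacneZ tvit '#').map (fun h => (h, ((PySem.Str.split? tvit ":").getD []).headD "")))).map
      (fun p => p.1))).map
      (fun k => (k, PySem.List.sorted (PySem.Set.ofList (((tviti.flatMap (fun tvit =>
        (seZacneZ tvit '#').map (fun h => (h, ((PySem.Str.split? tvit ":").getD []).headD "")))).filter
        (fun p => p.1 == k)).map (fun p => p.2))) (fun x => x) false))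
  rw [hslovar, pvFold_shape]
  unfold pvShape
  rw [List.map_map]
  apply List.map_congr_left
  intro k _
  rfl

-- ===== VERDICT (by name: the statement is the Claim_ definition above) =====
theorem hashtagi_spec : Claim_equal_hashtagi := by
  intro tviti _
  unfold Spec_hashtagi
  exact pvHashtagi_eq tviti
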